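-- pv_equiv track=rewrite | github.com/tsaoni/leetcode | maximum_number_of_tasks_you_can_assign.py | maxTaskAssign3
-- ===== SOURCE A (Python) =====
-- from typing import List
--
-- def maxTaskAssign3(tasks: List[int], workers: List[int], pills: int, strength: int) -> int:
--     """
--     still a wrong implementation :')
--     """
--     tasks.sort()
--     workers.sort()
--     def find(l, v):
--         left, right = 0, len(l) - 1
--
--         while left < right:
--             mid = (left + right + 1) // 2
--             if v >= l[mid]:
--                 left = mid
--             else:
--                 right = mid - 1
--         if l[left] > v:
--             return -1
--         return left
--
--
--     import bisect
--     avail = tasks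
--     ret = 0
--     redundants = []
--     for w in workers:
--         if len(avail) == 0:
--             return ret
--         else:
--             idx = find(avail, w)
--             if idx < 0:
--                 redundants.append(w)
--             else:
--                 ret += 1
--                 avail.pop(idx)
--
--     for w in redundants:
--         if pills > 0 and len(avail) > 0:
--             idx = find(avail, w + strength)
--             if idx >= 0:
--                 avail.pop(idx)
--                 pills -= 1
--                 ret += 1
--         else:
--             break
--
--     return ret
-- ===== SOURCE B (Python) =====
-- import bisect
-- from typing import List
--
-- def maxTaskAssign3(tasks: List[int], workers: List[int], pills: int, strength: int) -> int:
--     # Match of A's RETURN VALUE only: A sorts its argument lists in place; B does not mutate them.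
--     ts = sorted(tasks)
--     ret = 0
--     pool = []          # available tasks already known to be <= some processed worker, sorted ascending
--     i = 0              # frontier into ts: ts[i:] not yet pulled into the pool
--     redundants = []
--     for w in sorted(workers):
--         while i < len(ts) and ts[i] <= w:
--             pool.append(ts[i])
--             i += 1
--         if pool:
--             pool.pop()          # largest available task <= w, O(1)
--             ret += 1
--         else:
--             redundants.append(w)
--     for w in redundants:
--         if pills <= 0:
--             break
--         v = w + strength
--         while i < len(ts) and ts[i] <= v:
--             pool.append(ts[i])
--             i += 1
--         j = bisect.bisect_right(pool, v)
--         if j > 0: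
--             pool.pop(j - 1)     # largest available task <= v
--             pills -= 1
--             ret += 1
--     return ret
-- ===== Notes on version B (the rewrite author's own statement) =====
-- stated objective: faster
-- what changed: Replaces A's per-worker binary search over (and O(n) pop from) the whole remaining task list by a single sorted two-pointer sweep that feeds tasks at or below the current worker's reach into a pool list, so phase 1 pops the largest eligible task in O(1) from the pool's end and phase 2 binary-searches only the pool.
import Mathlib
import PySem

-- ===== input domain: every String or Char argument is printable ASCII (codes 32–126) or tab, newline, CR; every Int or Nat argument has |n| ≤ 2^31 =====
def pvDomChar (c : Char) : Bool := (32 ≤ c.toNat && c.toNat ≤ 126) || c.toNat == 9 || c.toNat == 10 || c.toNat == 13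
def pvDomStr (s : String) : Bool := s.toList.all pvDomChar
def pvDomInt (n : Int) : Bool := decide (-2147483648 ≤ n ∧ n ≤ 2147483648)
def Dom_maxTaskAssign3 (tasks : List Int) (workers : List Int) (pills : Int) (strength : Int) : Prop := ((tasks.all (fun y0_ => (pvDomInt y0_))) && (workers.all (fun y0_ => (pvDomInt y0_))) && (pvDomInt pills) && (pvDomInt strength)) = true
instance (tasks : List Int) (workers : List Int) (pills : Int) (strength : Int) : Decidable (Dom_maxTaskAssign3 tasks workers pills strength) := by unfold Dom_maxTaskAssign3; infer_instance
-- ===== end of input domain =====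

-- B replaces A's per-worker binary-search-and-pop on the whole task list by a sorted two-pointer
-- sweep with a pool stack (objective: faster, constant-factor/asymptotic in phase 1).
-- Equivalence is about the RETURN value only: A sorts its argument lists in place and pops from
-- `tasks`; B does not mutate its arguments.

-- ===== PORT A =====
-- A's `find` while-loop: left, right = 0, len(l)-1; binary search for the last index with l[idx] <= v.
-- Indexing uses getD 0: every caller passes a nonempty l, and then the loop keeps 0 ≤ left ≤ right < len,
-- so the default is never read (the Python guards each call site the same way).
def pvFindLoopA (l : List Int) (v : Int) (left right : Nat) : Nat :=
  if h : left < right then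
    let mid := (left + right + 1) / 2
    if v ≥ l.getD mid 0 then pvFindLoopA l v mid right
    else pvFindLoopA l v left (mid - 1)
  else left
termination_by right - left
decreasing_by
  · omega
  · omega

def pvFindA (l : List Int) (v : Int) : Int :=
  let left := pvFindLoopA l v 0 (l.length - 1)
  if l.getD left 0 > v then -1 else (left : Int)

-- first loop of A: returns (earlyReturn?, ret, avail, redundants)
def pvPhase1A : List Int → List Int → Int → List Int → Bool × Int × List Int × List Int
  | [], avail, ret, reds => (false, ret, avail, reds)
  | w :: ws, avail, ret, reds =>
    if avail.length = 0 then (true, ret, avail, reds)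
    else
      let idx := pvFindA avail w
      if idx < 0 then pvPhase1A ws avail ret (reds ++ [w])
      else
        match PySem.List.pop? avail idx with
        | some (_, av) => pvPhase1A ws av (ret + 1) reds
        | none => (true, ret, avail, reds)  -- unreachable totalization guard: idx is in range here

-- second loop of A (the `break` is the non-recursive branch)
def pvPhase2A (strength : Int) : List Int → List Int → Int → Int → Int
  | [], _, _, ret => ret
  | w :: ws, avail, pills, ret =>
    if pills > 0 ∧ avail.length > 0 then
      let idx := pvFindA avail (w + strength)
      if idx ≥ 0 then
        match PySem.List.pop? avail idx with
        | some (_, av) => pvPhase2A strength ws av (pills - 1) (ret + 1)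
        | none => ret  -- unreachable totalization guard
      else pvPhase2A strength ws avail pills ret
    else ret

def maxTaskAssign3 (tasks : List Int) (workers : List Int) (pills : Int) (strength : Int) : Int :=
  let ts := PySem.List.sorted tasks (fun x => x) false
  let ws := PySem.List.sorted workers (fun x => x) false
  match pvPhase1A ws ts 0 [] with
  | (true, ret, _, _) => ret
  | (false, ret, avail, reds) => pvPhase2A strength reds avail pills ret

-- ===== PORT B =====
-- B's inner while loop: pull the tasks at the frontier that are ≤ v into the pool.
def pvExtend (pool rest : List Int) (v : Int) : List Int × List Int :=
  match rest with
  | [] => (pool, [])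
  | t :: r => if t ≤ v then pvExtend (pool ++ [t]) r v else (pool, t :: r)

-- first loop of B: returns (pool, rest, ret, redundants)
def pvPhase1B : List Int → List Int → List Int → Int → List Int → List Int × List Int × Int × List Int
  | [], pool, rest, ret, reds => (pool, rest, ret, reds)
  | w :: ws, pool, rest, ret, reds =>
    match pvExtend pool rest w with
    | (p, r) =>
      if p = [] then pvPhase1B ws p r ret (reds ++ [w])
      else pvPhase1B ws p.dropLast r (ret + 1) reds   -- pool.pop(): drop the last (largest) element

-- second loop of B
def pvPhase2B (strength : Int) : List Int → List Int → List Int → Int → Int → Int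
  | [], _, _, _, ret => ret
  | w :: ws, pool, rest, pills, ret =>
    if pills ≤ 0 then ret
    else
      let v := w + strength
      match pvExtend pool rest v with
      | (p, r) =>
        let j := PySem.List.bisectRight p v
        if 0 < j then pvPhase2B strength ws (p.eraseIdx (j - 1)) r (pills - 1) (ret + 1)
          -- pool.pop(j-1): exact, since 0 < j ≤ len(pool)
        else pvPhase2B strength ws p r pills ret

def maxTaskAssign3_alt (tasks : List Int) (workers : List Int) (pills : Int) (strength : Int) : Int :=
  let ts := PySem.List.sorted tasks (fun x => x) false
  let ws := PySem.List.sorted workers (fun x => x) false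
  match pvPhase1B ws [] ts 0 [] with
  | (pool, rest, ret, reds) => pvPhase2B strength reds pool rest pills ret

-- ===== PRECONDITION & SPEC =====
def Spec_maxTaskAssign3 (tasks : List Int) (workers : List Int) (pills : Int) (strength : Int) (out : Int) : Prop := out = maxTaskAssign3_alt tasks workers pills strength
instance (tasks : List Int) (workers : List Int) (pills : Int) (strength : Int) (out : Int) : Decidable (Spec_maxTaskAssign3 tasks workers pills strength out) := by unfold Spec_maxTaskAssign3; infer_instance

-- ===== CLAIM (what is proved, stated in full; the proofs are below) =====
def Claim_equal_maxTaskAssign3 : Prop := ∀ (tasks : List Int) (workers : List Int) (pills : Int) (strength : Int), Dom_maxTaskAssign3 tasks workers pills strength → Spec_maxTaskAssign3 tasks workers pills strength (maxTaskAssign3 tasks workers pills strength)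

-- ===== LEMMAS AND PROOFS =====

-- number of elements ≤ v
def pvCntLe (l : List Int) (v : Int) : Nat := l.countP (fun x => decide (x ≤ v))

lemma pvCntLe_le_length (l : List Int) (v : Int) : pvCntLe l v ≤ l.length :=
  List.countP_le_length

-- in a sorted list, the elements ≤ v are exactly the first pvCntLe of them
lemma pvSorted_le_iff (l : List Int) (v : Int) (hs : l.Pairwise (· ≤ ·)) (i : Nat) (hi : i < l.length) :
    l[i] ≤ v ↔ i < pvCntLe l v := by
  induction l generalizing i with
  | nil => simp at hi
  | cons x xs ih =>
    rcases List.pairwise_cons.mp hs with ⟨hx, hxs⟩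
    have hcons : pvCntLe (x :: xs) v = pvCntLe xs v + (if x ≤ v then 1 else 0) := by
      simp [pvCntLe, List.countP_cons]
    by_cases hxv : x ≤ v
    · cases i with
      | zero => simp [hcons, hxv]
      | succ i =>
        have hi' : i < xs.length := by simpa using hi
        simp only [List.getElem_cons_succ]
        rw [ih hxs i hi', hcons, if_pos hxv]
        omega
    · have hzero : pvCntLe xs v = 0 := by
        rw [pvCntLe, List.countP_eq_zero]
        intro y hy
        simp only [decide_eq_true_eq]
        have := hx y hy
        omega
      cases i with
      | zero => simp [hcons, hxv, hzero]
      | succ i =>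
        have hi' : i < xs.length := by simpa using hi
        simp only [List.getElem_cons_succ]
        rw [hcons, if_neg hxv, hzero]
        constructor
        · intro h
          exfalso
          have hmem : xs[i] ∈ xs := List.getElem_mem hi'
          have := hx _ hmem
          omega
        · intro h
          omega

-- A's binary-search loop lands on pvCntLe - 1 (Nat subtraction; 0 when pvCntLe = 0)
lemma pvFindLoopA_spec (l : List Int) (v : Int) (hs : l.Pairwise (· ≤ ·)) :
    ∀ d left right, right - left = d → right < l.length →
      left ≤ pvCntLe l v - 1 → pvCntLe l v - 1 ≤ right →
      pvFindLoopA l v left right = pvCntLe l v - 1 := by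
  intro d
  induction d using Nat.strong_induction_on with
  | _ d ih =>
    intro left right hd hr hl hrt
    rw [pvFindLoopA]
    by_cases hlr : left < right
    · simp only [hlr, dif_pos]
      have hmid1 : left < (left + right + 1) / 2 := by omega
      have hmid2 : (left + right + 1) / 2 ≤ right := by omega
      have hmlt : (left + right + 1) / 2 < l.length := by omega
      by_cases hv : v ≥ l.getD ((left + right + 1) / 2) 0
      · simp only [hv, if_pos]
        have hle : l[(left + right + 1) / 2] ≤ v := by
          have := List.getD_eq_getElem l 0 hmlt
          omega
        have hlt := (pvSorted_le_iff l v hs _ hmlt).mp hle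
        exact ih (right - (left + right + 1) / 2) (by omega) _ _ rfl hr (by omega) hrt
      · simp only [hv, if_neg, not_false_iff]
        have hgt : ¬ l[(left + right + 1) / 2] ≤ v := by
          have := List.getD_eq_getElem l 0 hmlt
          omega
        have hge : pvCntLe l v ≤ (left + right + 1) / 2 := by
          by_contra hcon
          exact hgt ((pvSorted_le_iff l v hs _ hmlt).mpr (by omega))
        exact ih ((left + right + 1) / 2 - 1 - left) (by omega) _ _ rfl (by omega) hl (by omega)
    · simp only [hlr, dif_neg, not_false_iff]
      omega

lemma pvFindA_spec (l : List Int) (v : Int) (hs : l.Pairwise (· ≤ ·)) (hne : l ≠ []) :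
    pvFindA l v = (pvCntLe l v : Int) - 1 := by
  have hlen : 0 < l.length := List.length_pos_iff.mpr hne
  have hc := pvCntLe_le_length l v
  have hloop := pvFindLoopA_spec l v hs (l.length - 1 - 0) 0 (l.length - 1) rfl
      (by omega) (by omega) (by omega)
  unfold pvFindA
  rw [hloop]
  have ht : pvCntLe l v - 1 < l.length := by omega
  have hg := List.getD_eq_getElem l 0 ht
  by_cases h0 : pvCntLe l v = 0
  · have : ¬ l[pvCntLe l v - 1] ≤ v := by
      intro hcon
      have := (pvSorted_le_iff l v hs _ ht).mp hcon
      omega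
    rw [if_pos (by omega)]
    omega
  · have : l[pvCntLe l v - 1] ≤ v := (pvSorted_le_iff l v hs _ ht).mpr (by omega)
    rw [if_neg (by omega)]
    omega

lemma pvExtend_spec (v : Int) : ∀ pool rest : List Int,
    pvExtend pool rest v =
      (pool ++ rest.takeWhile (fun x => decide (x ≤ v)), rest.dropWhile (fun x => decide (x ≤ v))) := by
  intro pool rest
  induction rest generalizing pool with
  | nil => simp [pvExtend]
  | cons t r ih =>
    rw [pvExtend]
    by_cases ht : t ≤ v
    · rw [if_pos ht, ih]
      simp [ht]
    · rw [if_neg ht]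
      simp [ht]

-- a sorted list's dropWhile (≤ v) contains only elements > v
lemma pvDropWhile_gt (v : Int) : ∀ rest : List Int, rest.Pairwise (· ≤ ·) →
    ∀ y ∈ rest.dropWhile (fun x => decide (x ≤ v)), v < y := by
  intro rest hs y hy
  induction rest with
  | nil => simp at hy
  | cons t r ih =>
    rcases List.pairwise_cons.mp hs with ⟨ht, hr⟩
    by_cases htv : t ≤ v
    · rw [List.dropWhile_cons, if_pos (by simpa using htv)] at hy
      exact ih hr hy
    · rw [List.dropWhile_cons, if_neg (by simpa using htv)] at hy
      rcases List.mem_cons.mp hy with h | h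
      · omega
      · have := ht y h
        omega

-- counting ≤ v in pool ++ rest-after-extend is bisectRight of the (sorted) pool
lemma pvCnt_eq_bisect (p r : List Int) (v : Int) (hp : p.Pairwise (· ≤ ·))
    (hr : ∀ y ∈ r, v < y) : pvCntLe (p ++ r) v = PySem.List.bisectRight p v := by
  have hr0 : pvCntLe r v = 0 := by
    rw [pvCntLe, List.countP_eq_zero]
    intro y hy
    simp only [decide_eq_true_eq]
    have := hr y hy
    omega
  have happ : pvCntLe (p ++ r) v = pvCntLe p v := by
    simp [pvCntLe, List.countP_append] at *
    omega
  rw [happ]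
  rcases PySem.List.bisectRight_spec p v hp with ⟨hle, hlt, hgt⟩
  have hc := pvCntLe_le_length p v
  set c := pvCntLe p v with hcdef
  set j := PySem.List.bisectRight p v with hjdef
  rcases Nat.lt_trichotomy c j with h | h | h
  · have hcl : c < p.length := by omega
    have := hlt c hcl h
    have := (pvSorted_le_iff p v hp c hcl).mp this
    omega
  · exact h
  · have hjl : j < p.length := by omega
    have := (pvSorted_le_iff p v hp j hjl).mpr h
    have := hgt j hjl (le_refl j)
    omega

-- B's second loop is a no-op once everything is exhausted
lemma pvPhase2B_nil (strength : Int) : ∀ ws pills ret, pvPhase2B strength ws [] [] pills ret = ret := by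
  intro ws
  induction ws with
  | nil => intro pills ret; rfl
  | cons w ws ih =>
    intro pills ret
    rw [pvPhase2B]
    by_cases hp : pills ≤ 0
    · rw [if_pos hp]
    · rw [if_neg hp]
      simp only [pvExtend]
      have hj : PySem.List.bisectRight ([] : List Int) (w + strength) = 0 := by
        have h0 := (PySem.List.bisectRight_spec ([] : List Int) (w + strength) (by simp)).1
        simp only [List.length_nil, Nat.le_zero] at h0
        exact h0
      rw [hj]
      simp only [lt_irrefl, if_false]
      exact ih pills ret

lemma pvPhase1B_nil : ∀ ws ret reds, pvPhase1B ws [] [] ret reds = ([], [], ret, reds ++ ws) := by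
  intro ws
  induction ws with
  | nil => intro ret reds; simp [pvPhase1B]
  | cons w ws ih =>
    intro ret reds
    rw [pvPhase1B]
    simp only [pvExtend, if_true]
    rw [ih]
    simp

-- the second loops agree
lemma pvPhase2_eq (strength : Int) : ∀ (reds pool rest : List Int) (pills ret : Int),
    (pool ++ rest).Pairwise (· ≤ ·) →
    pvPhase2A strength reds (pool ++ rest) pills ret = pvPhase2B strength reds pool rest pills ret := by
  intro reds
  induction reds with
  | nil => intro pool rest pills ret hs; rfl
  | cons w ws ih =>
    intro pool rest pills ret hs
    rw [pvPhase2A, pvPhase2B]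
    by_cases hp : pills ≤ 0
    · rw [if_neg (by rintro ⟨h1, _⟩; omega), if_pos hp]
    · rw [if_neg hp]
      by_cases hnil : pool ++ rest = []
      · rcases List.append_eq_nil_iff.mp hnil with ⟨hpo, hre⟩
        subst hpo; subst hre
        rw [if_neg (by rintro ⟨_, h2⟩; simp at h2)]
        simp only [pvExtend]
        have hj : PySem.List.bisectRight ([] : List Int) (w + strength) = 0 := by
          have h0 := (PySem.List.bisectRight_spec ([] : List Int) (w + strength) (by simp)).1
          simp only [List.length_nil, Nat.le_zero] at h0
          exact h0
        rw [hj]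
        simp only [lt_irrefl, if_false]
        exact (pvPhase2B_nil strength ws pills ret).symm
      · rw [if_pos ⟨by omega, List.length_pos_iff.mpr hnil⟩]
        have hrest : rest.Pairwise (· ≤ ·) := hs.sublist (List.sublist_append_right pool rest)
        have hsplit : pool ++ rest =
            (pool ++ rest.takeWhile (fun x => decide (x ≤ w + strength))) ++
              rest.dropWhile (fun x => decide (x ≤ w + strength)) := by
          rw [List.append_assoc, List.takeWhile_append_dropWhile]
        have hsP : ((pool ++ rest.takeWhile (fun x => decide (x ≤ w + strength))) ++
            rest.dropWhile (fun x => decide (x ≤ w + strength))).Pairwise (· ≤ ·) := hsplit ▸ hs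
        have hpP : (pool ++ rest.takeWhile (fun x => decide (x ≤ w + strength))).Pairwise (· ≤ ·) :=
          hsP.sublist (List.sublist_append_left _ _)
        have hdw : ∀ y ∈ rest.dropWhile (fun x => decide (x ≤ w + strength)), w + strength < y :=
          pvDropWhile_gt (w + strength) rest hrest
        have hcnt : pvCntLe (pool ++ rest) (w + strength) =
            PySem.List.bisectRight (pool ++ rest.takeWhile (fun x => decide (x ≤ w + strength))) (w + strength) := by
          rw [hsplit]
          exact pvCnt_eq_bisect _ _ _ hpP hdw
        have hfind := pvFindA_spec (pool ++ rest) (w + strength) hs hnil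
        have hjle := (PySem.List.bisectRight_spec _ (w + strength) hpP).1
        simp only [pvExtend_spec]
        by_cases hj0 : 0 < PySem.List.bisectRight (pool ++ rest.takeWhile (fun x => decide (x ≤ w + strength))) (w + strength)
        · rw [if_pos hj0]
          have hidx : pvFindA (pool ++ rest) (w + strength) =
              ((PySem.List.bisectRight (pool ++ rest.takeWhile (fun x => decide (x ≤ w + strength))) (w + strength) - 1 : Nat) : Int) := by
            rw [hfind, hcnt]
            push_cast [Nat.cast_sub hj0]
            ring
          have hlt : PySem.List.bisectRight (pool ++ rest.takeWhile (fun x => decide (x ≤ w + strength))) (w + strength) - 1 <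
              (pool ++ rest).length := by
            have h1 : (pool ++ rest.takeWhile (fun x => decide (x ≤ w + strength))).length ≤ (pool ++ rest).length := by
              simp only [List.length_append]
              have : (rest.takeWhile (fun x => decide (x ≤ w + strength))).length ≤ rest.length :=
                (List.takeWhile_sublist _).length_le
              omega
            omega
          rw [hidx, if_pos (by omega), PySem.List.pop?_natCast _ _ hlt]
          have herase : (pool ++ rest).eraseIdx
              (PySem.List.bisectRight (pool ++ rest.takeWhile (fun x => decide (x ≤ w + strength))) (w + strength) - 1) =
              (pool ++ rest.takeWhile (fun x => decide (x ≤ w + strength))).eraseIdx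
                (PySem.List.bisectRight (pool ++ rest.takeWhile (fun x => decide (x ≤ w + strength))) (w + strength) - 1) ++
              rest.dropWhile (fun x => decide (x ≤ w + strength)) := by
            rw [hsplit]
            exact List.eraseIdx_append_of_lt_length (by omega) _
          rw [herase]
          exact ih _ _ _ _ (hsP.sublist ((List.eraseIdx_sublist _ _).append_right _))
        · rw [if_neg hj0]
          have hj0' : PySem.List.bisectRight (pool ++ rest.takeWhile (fun x => decide (x ≤ w + strength))) (w + strength) = 0 := by
            omega
          have hidx : pvFindA (pool ++ rest) (w + strength) = -1 := by
            rw [hfind, hcnt, hj0']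
            simp
          rw [hidx, if_neg (by norm_num)]
          rw [hsplit]
          exact ih _ _ _ _ hsP

-- the whole pipeline after sorting agrees
lemma pvRun_eq (strength pills : Int) : ∀ (ws pool rest : List Int) (ret : Int) (reds : List Int),
    (pool ++ rest).Pairwise (· ≤ ·) → ws.Pairwise (· ≤ ·) →
    (∀ x ∈ pool, ∀ w ∈ ws, x ≤ w) →
    (match pvPhase1A ws (pool ++ rest) ret reds with
     | (true, r, _, _) => r
     | (false, r, av, rd) => pvPhase2A strength rd av pills r)
    = (match pvPhase1B ws pool rest ret reds with
       | (p, r, rt, rd) => pvPhase2B strength rd p r pills rt) := by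
  intro ws
  induction ws with
  | nil =>
    intro pool rest ret reds hs _ _
    exact pvPhase2_eq strength reds pool rest pills ret hs
  | cons w ws ih =>
    intro pool rest ret reds hs hws hple
    rcases List.pairwise_cons.mp hws with ⟨hwle, hws'⟩
    rw [pvPhase1A, pvPhase1B]
    by_cases hnil : pool ++ rest = []
    · rcases List.append_eq_nil_iff.mp hnil with ⟨hpo, hre⟩
      subst hpo; subst hre
      rw [if_pos (by simp)]
      simp [pvExtend, pvPhase1B_nil, pvPhase2B_nil]
    · rw [if_neg (by simpa using hnil)]
      have hrest : rest.Pairwise (· ≤ ·) := hs.sublist (List.sublist_append_right pool rest)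
      have hsplit : pool ++ rest =
          (pool ++ rest.takeWhile (fun x => decide (x ≤ w))) ++ rest.dropWhile (fun x => decide (x ≤ w)) := by
        rw [List.append_assoc, List.takeWhile_append_dropWhile]
      have hsP : ((pool ++ rest.takeWhile (fun x => decide (x ≤ w))) ++
          rest.dropWhile (fun x => decide (x ≤ w))).Pairwise (· ≤ ·) := hsplit ▸ hs
      have hdw : ∀ y ∈ rest.dropWhile (fun x => decide (x ≤ w)), w < y := pvDropWhile_gt w rest hrest
      have hplew : ∀ x ∈ pool ++ rest.takeWhile (fun x => decide (x ≤ w)), x ≤ w := by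
        intro x hx
        rcases List.mem_append.mp hx with h | h
        · exact hple x h w List.mem_cons_self
        · have := List.mem_takeWhile_imp h
          simpa using this
      have hcnt : pvCntLe (pool ++ rest) w = (pool ++ rest.takeWhile (fun x => decide (x ≤ w))).length := by
        rw [hsplit, pvCntLe, List.countP_append]
        have h1 : (pool ++ rest.takeWhile (fun x => decide (x ≤ w))).countP (fun x => decide (x ≤ w)) =
            (pool ++ rest.takeWhile (fun x => decide (x ≤ w))).length := by
          rw [List.countP_eq_length]
          intro x hx
          simpa using hplew x hx
        have h2 : (rest.dropWhile (fun x => decide (x ≤ w))).countP (fun x => decide (x ≤ w)) = 0 := by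
          rw [List.countP_eq_zero]
          intro y hy
          have := hdw y hy
          simpa using by omega
        omega
      have hfind := pvFindA_spec (pool ++ rest) w hs hnil
      simp only [pvExtend_spec]
      by_cases hpnil : pool ++ rest.takeWhile (fun x => decide (x ≤ w)) = []
      · rw [if_pos hpnil]
        rcases List.append_eq_nil_iff.mp hpnil with ⟨hpo, htw⟩
        subst hpo
        have hdwr : rest.dropWhile (fun x => decide (x ≤ w)) = rest := by
          conv_rhs => rw [← List.takeWhile_append_dropWhile (p := fun x => decide (x ≤ w)) (l := rest)]
          rw [htw, List.nil_append]
        have hidx : pvFindA ([] ++ rest) w = -1 := by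
          rw [hfind, hcnt, hpnil]
          simp
        rw [hidx, if_pos (by norm_num), hdwr, hpnil]
        exact ih [] rest ret (reds ++ [w]) hs hws' (by simp)
      · rw [if_neg hpnil]
        have hplen : 0 < (pool ++ rest.takeWhile (fun x => decide (x ≤ w))).length :=
          List.length_pos_iff.mpr hpnil
        have hidx : pvFindA (pool ++ rest) w =
            (((pool ++ rest.takeWhile (fun x => decide (x ≤ w))).length - 1 : Nat) : Int) := by
          rw [hfind, hcnt]
          push_cast [Nat.cast_sub hplen]
          ring
        have hlt : (pool ++ rest.takeWhile (fun x => decide (x ≤ w))).length - 1 < (pool ++ rest).length := by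
          have h1 : (pool ++ rest.takeWhile (fun x => decide (x ≤ w))).length ≤ (pool ++ rest).length := by
            simp only [List.length_append]
            have : (rest.takeWhile (fun x => decide (x ≤ w))).length ≤ rest.length :=
              (List.takeWhile_sublist _).length_le
            omega
          omega
        rw [hidx, if_neg (by omega), PySem.List.pop?_natCast _ _ hlt]
        have herase : (pool ++ rest).eraseIdx ((pool ++ rest.takeWhile (fun x => decide (x ≤ w))).length - 1) =
            (pool ++ rest.takeWhile (fun x => decide (x ≤ w))).dropLast ++ rest.dropWhile (fun x => decide (x ≤ w)) := by
          rw [hsplit, List.eraseIdx_append_of_lt_length (by omega) _, List.eraseIdx_length_sub_one]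
        rw [herase]
        exact ih _ _ _ _ (hsP.sublist ((List.dropLast_sublist _).append_right _)) hws'
          (fun x hx w' hw' => le_trans (hplew x (List.dropLast_subset _ hx)) (hwle w' hw'))

-- ===== VERDICT (by name: the statement is the Claim_ definition above) =====
theorem maxTaskAssign3_spec : Claim_equal_maxTaskAssign3 := by
  intro tasks workers pills strength _
  unfold Spec_maxTaskAssign3 maxTaskAssign3 maxTaskAssign3_alt
  have h := pvRun_eq strength pills (PySem.List.sorted workers (fun x => x) false) []
      (PySem.List.sorted tasks (fun x => x) false) 0 []
      (by simpa using PySem.List.sorted_pairwise tasks (fun x => x))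
      (PySem.List.sorted_pairwise workers (fun x => x))
      (by intro x hx; simp at hx)
  simpa using h
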